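-- pv_equiv track=rewrite | github.com/mutjin08/baekjoon | Greedy/16953_A → B.py | solution
-- ===== SOURCE A (Python) =====
-- def  solution(a, b):
--     if b < a:
--         return -1
--
--     cnt = 0
--     while b > a:
--         last = b%10
--         if last == 1:
--             b //= 10
--             cnt += 1
--         elif last % 2 == 0:
--             b //= 2
--             cnt += 1
--         else:
--             return -1
--
--     if b!=a:
--         return -1
--     return cnt + 1
-- ===== SOURCE B (Python) =====
-- def solution(a, b):
--     # Forward level-by-level search from a: children 2*x and 10*x+1, pruned to (x, b].
--     # Each value has a unique parent, so the depth at which b appears (if ever) equals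
--     # the greedy reverse step count.
--     if b < a:
--         return -1
--     frontier = [a]
--     depth = 0
--     while frontier:
--         nxt = []
--         for x in frontier:
--             if x == b:
--                 return depth + 1
--             for y in (2 * x, 10 * x + 1):
--                 if x < y <= b:
--                     nxt.append(y)
--         frontier = nxt
--         depth += 1
--     return -1
-- ===== Notes on version B (the rewrite author's own statement) =====
-- stated objective: alternative
-- what changed: B replaces A's backward greedy digit-stripping loop (repeatedly strip a trailing 1 or halve b until it meets a) with a forward breadth-first level search from a whose children are 2*x and 10*x+1 pruned to (x, b]; the depth at which b is found equals A's step count because every value has a unique parent.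
-- outside the precondition, e.g. on solution(-1, 0): A does not finish within the time limit, B returns -1; on solution(-1, 3): A returns -1, B returns -1
import Mathlib
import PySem

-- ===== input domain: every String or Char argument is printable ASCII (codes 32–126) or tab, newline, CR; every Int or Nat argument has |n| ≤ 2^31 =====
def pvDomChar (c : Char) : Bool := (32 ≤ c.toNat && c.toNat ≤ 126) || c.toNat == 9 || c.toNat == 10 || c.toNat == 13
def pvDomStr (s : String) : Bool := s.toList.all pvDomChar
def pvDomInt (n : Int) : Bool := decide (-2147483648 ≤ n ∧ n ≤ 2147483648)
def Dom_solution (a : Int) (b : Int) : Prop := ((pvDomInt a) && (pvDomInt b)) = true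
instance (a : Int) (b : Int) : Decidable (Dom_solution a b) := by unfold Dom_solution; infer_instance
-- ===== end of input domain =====

-- B replaces A's backward greedy digit-stripping loop with a forward level-by-level
-- search from a (children 2*x and 10*x+1, pruned to (x, b]); same return value on Pre_.

-- ===== PORT A =====
-- the while loop of A; fuel only makes the recursion total (within Pre_ it never runs out)
def aLoop : Nat → Int → Int → Int → Int
  | 0, _, _, _ => -1
  | f+1, a, b, cnt =>
    if a < b then
      let last := PySem.Int.mod b 10
      if last = 1 then aLoop f a (PySem.Int.floordiv b 10) (cnt + 1)
      else if PySem.Int.mod last 2 = 0 then aLoop f a (PySem.Int.floordiv b 2) (cnt + 1)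
      else -1
    else if b ≠ a then -1 else cnt + 1

def solution (a : Int) (b : Int) : Int :=
  if b < a then -1 else aLoop (b.natAbs + 1) a b 0

-- ===== PORT B =====
-- children of x pushed by B's inner loop: y ∈ {2*x, 10*x+1} with x < y ≤ b
def chl (b x : Int) : List Int :=
  (if x < 2*x ∧ 2*x ≤ b then [2*x] else []) ++
  (if x < 10*x+1 ∧ 10*x+1 ≤ b then [10*x+1] else [])

-- one pass of B's for-loop over the frontier: none = "x == b was hit" (early return)
def levelScan (b : Int) : List Int → Option (List Int)
  | [] => some []
  | x :: rest =>
    if x = b then none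
    else match levelScan b rest with
      | none => none
      | some nxt => some (chl b x ++ nxt)

-- B's while loop; fuel only makes it total (depth is bounded by b - a)
def bfs (b : Int) : Nat → List Int → Int → Int
  | 0, _, _ => -1
  | f+1, frontier, depth =>
    if frontier = [] then -1
    else match levelScan b frontier with
      | none => depth + 1
      | some nxt => bfs b f nxt (depth + 1)

def solution_alt (a : Int) (b : Int) : Int :=
  if b < a then -1 else bfs b ((b - a).toNat + 1) [a] 0

-- ===== PRECONDITION & SPEC =====
-- Pre_ excludes a < 0 ≤ b: there A's reduction of b can reach 0 and then spin forever
-- (0 //= 2 stays 0), e.g. a = -1, b = 0; on the excluded inputs where the loop hits a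
-- bad digit before reaching 0, A returns -1 and B agrees.
def Pre_solution (a : Int) (b : Int) : Prop := ¬ (a < 0 ∧ 0 ≤ b)
instance (a : Int) (b : Int) : Decidable (Pre_solution a b) := by unfold Pre_solution; infer_instance
def pvWitness_solution : Int × Int := (2, 162)

def Spec_solution (a : Int) (b : Int) (out : Int) : Prop := out = solution_alt a b
instance (a : Int) (b : Int) (out : Int) : Decidable (Spec_solution a b out) := by unfold Spec_solution; infer_instance

-- ===== CLAIM (what is proved, stated in full; the proofs are below) =====
def Claim_equal_solution : Prop := ∀ (a : Int) (b : Int), Dom_solution a b → Pre_solution a b → Spec_solution a b (solution a b)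

-- ===== LEMMAS AND PROOFS =====

-- RPath a y n: y is reachable from a in n of B's pruned forward steps (bound ≤ b is
-- kept out of RPath: along a path to b it holds automatically since values increase).
inductive RPath (a : Int) : Int → Nat → Prop
  | zero : RPath a a 0
  | dbl {x : Int} {n : Nat} : RPath a x n → x < 2*x → RPath a (2*x) (n+1)
  | ten {x : Int} {n : Nat} : RPath a x n → x < 10*x+1 → RPath a (10*x+1) (n+1)

lemma path_le {a y : Int} {n : Nat} (h : RPath a y n) : a + n ≤ y := by
  induction h with
  | zero => simp
  | dbl h hx ih => push_cast at *; omega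
  | ten h hx ih => push_cast at *; omega

lemma path_zero_eq {a y : Int} (h : RPath a y 0) : y = a := by cases h; rfl

lemma path_inv {a y : Int} {n : Nat} (h : RPath a y (n+1)) :
    ∃ x, RPath a x n ∧ x < y ∧ (y = 2*x ∨ y = 10*x+1) := by
  cases h with
  | dbl h hx => exact ⟨_, h, hx, Or.inl rfl⟩
  | ten h hx => exact ⟨_, h, hx, Or.inr rfl⟩

lemma path_len_unique {a : Int} : ∀ {n : Nat} {y : Int} {m : Nat},
    RPath a y n → RPath a y m → n = m := by
  intro n
  induction n with
  | zero =>
    intro y m h1 h2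
    cases m with
    | zero => rfl
    | succ m =>
      obtain ⟨x, hx, hlt, _⟩ := path_inv h2
      have := path_le hx
      have := path_zero_eq h1
      omega
  | succ n ih =>
    intro y m h1 h2
    cases m with
    | zero =>
      obtain ⟨x, hx, hlt, _⟩ := path_inv h1
      have := path_le hx
      have := path_zero_eq h2
      omega
    | succ m =>
      obtain ⟨x1, hx1, hlt1, hc1⟩ := path_inv h1
      obtain ⟨x2, hx2, hlt2, hc2⟩ := path_inv h2
      have hx12 : x1 = x2 := by rcases hc1 with rfl | rfl <;> rcases hc2 with h | h <;> omega
      subst hx12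
      have := ih hx1 hx2
      omega

lemma path_prefix {a y : Int} {n : Nat} (h : RPath a y n) :
    ∀ d ≤ n, ∃ z, RPath a z d ∧ z ≤ y := by
  induction h with
  | zero => intro d hd; interval_cases d; exact ⟨a, RPath.zero, le_rfl⟩
  | @dbl x n h hx ih =>
    intro d hd
    rcases Nat.eq_or_lt_of_le hd with rfl | hlt
    · exact ⟨2*x, RPath.dbl h hx, le_rfl⟩
    · obtain ⟨z, hz, hzx⟩ := ih d (by omega)
      exact ⟨z, hz, by omega⟩
  | @ten x n h hx ih =>
    intro d hd
    rcases Nat.eq_or_lt_of_le hd with rfl | hlt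
    · exact ⟨10*x+1, RPath.ten h hx, le_rfl⟩
    · obtain ⟨z, hz, hzx⟩ := ih d (by omega)
      exact ⟨z, hz, by omega⟩

lemma chl_mem {b x y : Int} :
    y ∈ chl b x ↔ ((y = 2*x ∨ y = 10*x+1) ∧ x < y ∧ y ≤ b) := by
  simp only [chl, List.mem_append]
  split_ifs with h1 h2 <;> simp <;> omega

lemma scan_eq (b : Int) : ∀ F : List Int,
    levelScan b F = if b ∈ F then none else some (F.flatMap (chl b)) := by
  intro F
  induction F with
  | nil => simp [levelScan]
  | cons x rest ih =>
    simp only [levelScan, ih]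
    by_cases hx : x = b
    · subst hx; simp
    · by_cases hb : b ∈ rest
      · simp [hx, hb, Ne.symm hx]
      · simp [hx, hb, Ne.symm hx]

lemma bfs_neg (a b : Int) (hnp : ∀ k, ¬ RPath a b k) :
    ∀ (f : Nat) (F : List Int) (d : Nat),
      (∀ y ∈ F, RPath a y d) → bfs b f F (d : Int) = -1 := by
  intro f
  induction f with
  | zero => intro F d _; simp [bfs]
  | succ f ih =>
    intro F d hF
    simp only [bfs]
    rw [scan_eq]
    have hbF : b ∉ F := fun hb => hnp d (hF b hb)
    by_cases hF0 : F = []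
    · simp [hF0]
    · simp only [hF0, hbF, if_false]
      have hcast : ((d : Int) + 1) = ((d + 1 : Nat) : Int) := by push_cast; ring
      rw [hcast]
      apply ih
      intro y hy
      rcases List.mem_flatMap.1 hy with ⟨x, hxF, hyx⟩
      rcases chl_mem.1 hyx with ⟨hc, hlt, _⟩
      have hx := hF x hxF
      rcases hc with rfl | rfl
      · exact RPath.dbl hx hlt
      · exact RPath.ten hx hlt

lemma bfs_pos (a b : Int) (k : Nat) (hk : RPath a b k) :
    ∀ (f : Nat) (F : List Int) (d : Nat),
      d ≤ k → (∀ y ∈ F, RPath a y d) → (∀ y, RPath a y d → y ≤ b → y ∈ F) →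
      k - d + 1 ≤ f → bfs b f F (d : Int) = (k : Int) + 1 := by
  intro f
  induction f with
  | zero => intro F d _ _ _ hf; omega
  | succ f ih =>
    intro F d hdk hS hC hf
    obtain ⟨z, hz, hzb⟩ := path_prefix hk d hdk
    have hFne : F ≠ [] := List.ne_nil_of_mem (hC z hz hzb)
    simp only [bfs]
    rw [scan_eq]
    by_cases hbF : b ∈ F
    · have hdk' : d = k := path_len_unique (hS b hbF) hk
      simp [hFne, hbF, hdk']
    · have hdk' : d < k := by
        rcases Nat.lt_or_ge d k with h | h
        · exact h
        · have : d = k := le_antisymm hdk h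
          exact absurd (hC b (this ▸ hk) le_rfl) hbF
      simp only [hFne, hbF, if_false]
      have hcast : ((d : Int) + 1) = ((d + 1 : Nat) : Int) := by push_cast; ring
      rw [hcast]
      apply ih _ (d+1) (by omega) ?_ ?_ (by omega)
      · intro y hy
        rcases List.mem_flatMap.1 hy with ⟨x, hxF, hyx⟩
        rcases chl_mem.1 hyx with ⟨hc, hlt, _⟩
        have hx := hS x hxF
        rcases hc with rfl | rfl
        · exact RPath.dbl hx hlt
        · exact RPath.ten hx hlt
      · intro y hy hyb
        obtain ⟨x, hx, hxy, hcase⟩ := path_inv hy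
        have hxF : x ∈ F := hC x hx (by omega)
        exact List.mem_flatMap.2 ⟨x, hxF, chl_mem.2 ⟨hcase, hxy, hyb⟩⟩

lemma m10 (c : Int) : PySem.Int.mod c 10 = c % 10 :=
  PySem.Int.mod_eq_emod_of_pos (by norm_num)

lemma m2 (c : Int) : PySem.Int.mod c 2 = c % 2 :=
  PySem.Int.mod_eq_emod_of_pos (by norm_num)

lemma d10 (c : Int) : PySem.Int.floordiv c 10 = c / 10 :=
  PySem.Int.floordiv_eq_ediv_of_pos (by norm_num)

lemma d2 (c : Int) : PySem.Int.floordiv c 2 = c / 2 :=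
  PySem.Int.floordiv_eq_ediv_of_pos (by norm_num)

lemma aLoop_pos (a : Int) : ∀ (f : Nat) (k : Nat) (c cnt : Int),
    RPath a c k → k + 1 ≤ f → aLoop f a c cnt = cnt + k + 1 := by
  intro f
  induction f with
  | zero => intro k c cnt _ hf; omega
  | succ f ih =>
    intro k c cnt h hf
    cases k with
    | zero =>
      have hc : c = a := path_zero_eq h
      subst hc
      simp [aLoop]
    | succ k =>
      obtain ⟨x, hx, hlt, hcase⟩ := path_inv h
      have hac : a < c := by have := path_le h; omega
      have hlex := path_le hx
      simp only [aLoop, if_pos hac, m10, m2]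
      rcases hcase with rfl | rfl
      · have h1 : ¬ (2*x % 10 = 1) := by omega
        have h2 : (2*x % 10) % 2 = 0 := by omega
        rw [if_neg h1, if_pos h2, d2]
        have hd : 2*x / 2 = x := by omega
        rw [hd, ih k x (cnt + 1) hx (by omega)]
        push_cast; ring
      · have h1 : (10*x+1) % 10 = 1 := by omega
        rw [if_pos h1, d10]
        have hd : (10*x+1) / 10 = x := by omega
        rw [hd, ih k x (cnt + 1) hx (by omega)]
        push_cast; ring

lemma aLoop_neg (a : Int) (ha : 0 ≤ a) : ∀ (f : Nat) (c cnt : Int),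
    0 ≤ c → (∀ k, ¬ RPath a c k) → aLoop f a c cnt = -1 := by
  intro f
  induction f with
  | zero => intro c cnt _ _; simp [aLoop]
  | succ f ih =>
    intro c cnt hc hnp
    by_cases hac : a < c
    · simp only [aLoop, if_pos hac, m10, m2]
      by_cases h1 : c % 10 = 1
      · rw [if_pos h1, d10]
        apply ih _ _ (by omega)
        intro k hk
        apply hnp (k + 1)
        have hc10 : c = 10 * (c / 10) + 1 := by omega
        have hltc : c / 10 < 10 * (c / 10) + 1 := by omega
        rw [hc10]
        exact RPath.ten hk hltc
      · by_cases h2 : (c % 10) % 2 = 0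
        · rw [if_neg h1, if_pos h2, d2]
          apply ih _ _ (by omega)
          intro k hk
          apply hnp (k + 1)
          have hc2 : c = 2 * (c / 2) := by omega
          have hltc : c / 2 < 2 * (c / 2) := by omega
          have : RPath a (2 * (c / 2)) (k + 1) := RPath.dbl hk hltc
          rwa [← hc2] at this
        · rw [if_neg h1, if_neg h2]
    · have hca : c ≠ a := fun h => hnp 0 (h ▸ RPath.zero)
      simp [aLoop, hac, hca]

lemma aLoop_negneg (a : Int) : ∀ (f : Nat) (b cnt : Int),
    a < b → b < 0 → aLoop f a b cnt = -1 := by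
  intro f
  induction f with
  | zero => intro b cnt _ _; simp [aLoop]
  | succ f ih =>
    intro b cnt hab hb
    simp only [aLoop, if_pos hab, m10, m2]
    by_cases h1 : b % 10 = 1
    · rw [if_pos h1, d10]
      exact ih _ _ (by omega) (by omega)
    · by_cases h2 : (b % 10) % 2 = 0
      · rw [if_neg h1, if_pos h2, d2]
        exact ih _ _ (by omega) (by omega)
      · rw [if_neg h1, if_neg h2]

lemma no_path_neg (a b : Int) (hb : b < 0) (hab : a < b) : ∀ k, ¬ RPath a b k := by
  intro k h
  cases k with
  | zero => have := path_zero_eq h; omega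
  | succ k =>
    obtain ⟨x, _, hlt, hcase⟩ := path_inv h
    omega

-- ===== VERDICT (by name: the statement is the Claim_ definition above) =====
theorem solution_spec : Claim_equal_solution := by
  intro a b _ hpre
  show solution a b = solution_alt a b
  unfold solution solution_alt
  by_cases hba : b < a
  · simp [hba]
  · simp only [if_neg hba]
    by_cases ha : 0 ≤ a
    · by_cases hp : ∃ k, RPath a b k
      · obtain ⟨k, hk⟩ := hp
        have hkb : a + (k : Int) ≤ b := path_le hk
        rw [aLoop_pos a _ k b 0 hk (by omega)]
        have hB := bfs_pos a b k hk ((b - a).toNat + 1) [a] 0 (by omega)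
          (by intro y hy; simp at hy; subst hy; exact RPath.zero)
          (by intro y hy _; have := path_zero_eq hy; simp [this])
          (by omega)
        simp only [Nat.cast_zero] at hB
        rw [hB]
        omega
      · push Not at hp
        rw [aLoop_neg a ha _ b 0 (by omega) hp]
        have hB := bfs_neg a b hp ((b - a).toNat + 1) [a] 0
          (by intro y hy; simp at hy; subst hy; exact RPath.zero)
        simp only [Nat.cast_zero] at hB
        rw [hB]
    · have hb : b < 0 := by
        unfold Pre_solution at hpre
        omega
      by_cases hab : b = a
      · subst hab
        simp [aLoop, bfs, levelScan]
      · have hab' : a < b := by omega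
        rw [aLoop_negneg a _ b 0 hab' hb]
        have hB := bfs_neg a b (no_path_neg a b hb hab') ((b - a).toNat + 1) [a] 0
          (by intro y hy; simp at hy; subst hy; exact RPath.zero)
        simp only [Nat.cast_zero] at hB
        rw [hB]
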